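-- pv_equiv track=rewrite | github.com/victoriaquirogaa/la-shamona | backend/routers/la_puta.py | calcular_cadena_tragos
-- ===== SOURCE A (Python) =====
-- def calcular_cadena_tragos(nombre_victima, mapa_jugadores, visitados=None):
--     if visitados is None:
--         visitados = set()
--
--     if nombre_victima in visitados:
--         return []
--
--     visitados.add(nombre_victima)
--     afectados = [nombre_victima]
--
--     # Buscamos a las putas de esta víctima
--     datos_victima = mapa_jugadores.get(nombre_victima, {})
--     mis_putas = datos_victima.get("putas", [])
--
--     for mascota in mis_putas:
--         # Recursividad: Si A toma -> B toma -> C toma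
--         afectados.extend(calcular_cadena_tragos(mascota, mapa_jugadores, visitados))
--
--     # Eliminamos duplicados manteniendo el orden
--     return list(dict.fromkeys(afectados))
-- ===== SOURCE B (Python) =====
-- def calcular_cadena_tragos(nombre_victima, mapa_jugadores, visitados=None):
--     # Iterative DFS with an explicit stack; one ordered output list, dedup by the
--     # visited set alone (no per-level dict.fromkeys pass).
--     # Mutates `visitados` exactly like A: every reached name is added to it.
--     if visitados is None:
--         visitados = set()
--     orden = []
--     stack = [nombre_victima]
--     while stack:
--         actual = stack.pop()
--         if actual in visitados:
--             continue
--         visitados.add(actual)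
--         orden.append(actual)
--         putas = mapa_jugadores.get(actual, {}).get("putas", [])
--         stack.extend(reversed(putas))
--     return orden
-- ===== Notes on version B (the rewrite author's own statement) =====
-- stated objective: alternative
-- what changed: Replaced A's recursive DFS, which rebuilds and re-deduplicates the accumulated list with dict.fromkeys at every recursion level, by a single iterative explicit-stack DFS that appends each name once, deduplicating only through the visited set.
import Mathlib
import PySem

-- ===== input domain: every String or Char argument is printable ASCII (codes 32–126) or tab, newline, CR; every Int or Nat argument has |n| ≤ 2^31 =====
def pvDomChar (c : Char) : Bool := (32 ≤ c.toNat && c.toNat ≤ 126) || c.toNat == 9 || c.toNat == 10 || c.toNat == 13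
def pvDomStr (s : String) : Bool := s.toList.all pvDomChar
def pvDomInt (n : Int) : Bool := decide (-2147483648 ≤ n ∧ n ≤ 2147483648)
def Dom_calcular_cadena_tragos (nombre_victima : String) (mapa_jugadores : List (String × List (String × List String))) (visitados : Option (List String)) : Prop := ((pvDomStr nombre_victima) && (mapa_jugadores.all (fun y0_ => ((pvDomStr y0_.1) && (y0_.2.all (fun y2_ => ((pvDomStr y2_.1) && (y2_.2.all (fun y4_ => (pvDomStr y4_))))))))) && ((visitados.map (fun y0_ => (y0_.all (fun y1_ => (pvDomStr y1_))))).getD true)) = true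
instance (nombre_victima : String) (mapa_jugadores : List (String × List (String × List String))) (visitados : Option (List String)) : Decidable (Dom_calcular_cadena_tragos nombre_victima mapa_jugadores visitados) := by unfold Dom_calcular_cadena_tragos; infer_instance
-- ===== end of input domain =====

-- B replaces A's recursive DFS with its per-call dict.fromkeys dedup pass by a single
-- explicit-stack DFS loop that appends each name once (the visited set is the only dedup).
-- Both Pythons add every reached name to the caller's `visitados` set (same side effect);
-- the theorems below are about the returned list.

-- mapa_jugadores.get(n, {}).get("putas", []) — appears verbatim in both Pythons
def pvChildren (mapa : List (String × List (String × List String))) (n : String) : List String :=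
  PySem.Dict.getD (PySem.Dict.mk (PySem.Dict.getD (PySem.Dict.mk mapa) n [])) "putas" []

-- ===== PORT A =====
-- A's recursion, with a fuel parameter for termination; the top level passes
-- mapa.length + 1, which the proofs show is never exhausted.
mutual
def calcAuxA (fuel : Nat) (nombre : String) (mapa : List (String × List (String × List String))) (vis : PySem.Set String) : List String × PySem.Set String :=
  match fuel with
  | 0 => ([], vis)
  | f + 1 =>
    if PySem.Set.contains vis nombre then ([], vis)
    else
      let vis1 := PySem.Set.add vis nombre
      let pr := calcListA f (pvChildren mapa nombre) mapa vis1
      (PySem.List.dedup (nombre :: pr.1), pr.2)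
termination_by (fuel, 0, 0)

-- the `for mascota in mis_putas` loop of A, threading the mutated visited set
def calcListA (fuel : Nat) (ms : List String) (mapa : List (String × List (String × List String))) (vis : PySem.Set String) : List String × PySem.Set String :=
  match ms with
  | [] => ([], vis)
  | m :: rest =>
    let pr1 := calcAuxA fuel m mapa vis
    let pr2 := calcListA fuel rest mapa pr1.2
    (pr1.1 ++ pr2.1, pr2.2)
termination_by (fuel, 1, ms.length)
end

def calcular_cadena_tragos (nombre_victima : String) (mapa_jugadores : List (String × List (String × List String))) (visitados : Option (List String)) : List String :=
  let vis := match visitados with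
    | none => PySem.Set.empty
    | some l => PySem.Set.ofList l
  (calcAuxA (mapa_jugadores.length + 1) nombre_victima mapa_jugadores vis).1

-- ===== PORT B =====
-- number of map keys not yet visited (termination measure for B's loop; proof helpers below)
def pvUnvis (mapa : List (String × List (String × List String))) (vis : PySem.Set String) : Nat :=
  ((mapa.map Prod.fst).filter (fun k => !(PySem.Set.contains vis k))).length

theorem pvNotMemIff (s : PySem.Set String) (a : String) : PySem.Set.contains s a = false ↔ a ∉ s := by
  rw [Bool.eq_false_iff, Ne, PySem.Set.contains_iff]

theorem pvContains_add_ne (vis : PySem.Set String) (x a : String) (hax : a ≠ x) :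
    PySem.Set.contains (PySem.Set.add vis x) a = PySem.Set.contains vis a := by
  cases hc : PySem.Set.contains vis a with
  | true =>
    exact (PySem.Set.contains_iff _ _).mpr
      ((PySem.Set.mem_add _ _ _).mpr (Or.inl ((PySem.Set.contains_iff _ _).mp hc)))
  | false =>
    rw [pvNotMemIff] at hc ⊢
    intro hm
    rcases (PySem.Set.mem_add _ _ _).mp hm with hm | hm
    · exact hc hm
    · exact hax hm

theorem pvFilter_add_le (l : List String) (vis : PySem.Set String) (x : String) :
    (l.filter (fun k => !(PySem.Set.contains (PySem.Set.add vis x) k))).length ≤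
      (l.filter (fun k => !(PySem.Set.contains vis k))).length := by
  apply List.Sublist.length_le
  apply List.monotone_filter_right
  intro a ha
  rw [Bool.not_eq_true'] at ha ⊢
  rw [pvNotMemIff] at ha ⊢
  exact fun hm => ha ((PySem.Set.mem_add _ _ _).mpr (Or.inl hm))

theorem pvFilter_add_lt (l : List String) (vis : PySem.Set String) (x : String)
    (hx : x ∈ l) (hv : x ∉ vis) :
    (l.filter (fun k => !(PySem.Set.contains (PySem.Set.add vis x) k))).length <
      (l.filter (fun k => !(PySem.Set.contains vis k))).length := by
  induction l with
  | nil => cases hx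
  | cons h t ih =>
    simp only [List.filter_cons]
    by_cases hxh : h = x
    · subst hxh
      have h1 : (!(PySem.Set.contains (PySem.Set.add vis h) h)) = false := by
        rw [Bool.not_eq_false']
        exact (PySem.Set.contains_iff _ _).mpr ((PySem.Set.mem_add _ _ _).mpr (Or.inr rfl))
      have h2 : (!(PySem.Set.contains vis h)) = true := by
        rw [Bool.not_eq_true']
        exact (pvNotMemIff _ _).mpr hv
      rw [h1, h2]
      simp only [if_false, if_true, Bool.false_eq_true, List.length_cons]
      exact Nat.lt_succ_of_le (pvFilter_add_le t vis h)
    · have hx' : x ∈ t := by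
        rcases List.mem_cons.mp hx with hx | hx
        · exact absurd hx.symm hxh
        · exact hx
      rw [pvContains_add_ne vis x h (fun he => hxh he)]
      by_cases hb : PySem.Set.contains vis h
      · simp only [hb, Bool.not_true, if_false, Bool.false_eq_true]
        exact ih hx'
      · have hb' : PySem.Set.contains vis h = false := Bool.eq_false_iff.mpr hb
        simp only [hb', Bool.not_false, if_true, List.length_cons]
        exact Nat.succ_lt_succ (ih hx')

theorem pvUnvis_lt (mapa : List (String × List (String × List String))) (vis : PySem.Set String) (x : String)
    (hx : x ∈ mapa.map Prod.fst) (hv : x ∉ vis) :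
    pvUnvis mapa (PySem.Set.add vis x) < pvUnvis mapa vis :=
  pvFilter_add_lt (mapa.map Prod.fst) vis x hx hv

theorem pvChildren_of_not_key (mapa : List (String × List (String × List String))) (n : String)
    (h : n ∉ mapa.map Prod.fst) : pvChildren mapa n = [] := by
  unfold pvChildren
  have hc : (PySem.Dict.mk mapa).contains n = false := by
    rw [PySem.Dict.contains_eq_decide_mem_keys]
    simpa [PySem.Dict.keys] using h
  rw [PySem.Dict.getD_of_not_contains _ _ hc]
  rfl

theorem pvUnvis_add_not_key (mapa : List (String × List (String × List String))) (vis : PySem.Set String) (x : String)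
    (h : x ∉ mapa.map Prod.fst) : pvUnvis mapa (PySem.Set.add vis x) = pvUnvis mapa vis := by
  unfold pvUnvis
  congr 1
  apply List.filter_congr
  intro a ha
  rw [pvContains_add_ne vis x a (fun he => h (he ▸ ha))]

-- B's while-loop: explicit stack (head = Python's top / list end), one ordered output list
def calcLoopB (mapa : List (String × List (String × List String))) (stack : List String) (vis : PySem.Set String) (orden : List String) : List String :=
  match stack with
  | [] => orden
  | actual :: rest =>
    if PySem.Set.contains vis actual then
      calcLoopB mapa rest vis orden
    else
      calcLoopB mapa (pvChildren mapa actual ++ rest) (PySem.Set.add vis actual) (orden ++ [actual])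
termination_by (pvUnvis mapa vis, stack.length)
decreasing_by
  · exact Prod.Lex.right _ (Nat.lt_succ_self _)
  · rename_i hc
    by_cases hk : actual ∈ mapa.map Prod.fst
    · exact Prod.Lex.left _ _ (pvUnvis_lt mapa vis actual hk
        (fun hm => hc ((PySem.Set.contains_iff _ _).mpr hm)))
    · rw [pvUnvis_add_not_key mapa vis actual hk, pvChildren_of_not_key mapa actual hk]
      exact Prod.Lex.right _ (Nat.lt_succ_self _)

def calcular_cadena_tragos_alt (nombre_victima : String) (mapa_jugadores : List (String × List (String × List String))) (visitados : Option (List String)) : List String :=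
  let vis := match visitados with
    | none => PySem.Set.empty
    | some l => PySem.Set.ofList l
  calcLoopB mapa_jugadores [nombre_victima] vis []

-- ===== PRECONDITION & SPEC =====
def Spec_calcular_cadena_tragos (nombre_victima : String) (mapa_jugadores : List (String × List (String × List String))) (visitados : Option (List String)) (out : List String) : Prop := out = calcular_cadena_tragos_alt nombre_victima mapa_jugadores visitados
instance (nombre_victima : String) (mapa_jugadores : List (String × List (String × List String))) (visitados : Option (List String)) (out : List String) : Decidable (Spec_calcular_cadena_tragos nombre_victima mapa_jugadores visitados out) := by unfold Spec_calcular_cadena_tragos; infer_instance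

-- ===== CLAIM (what is proved, stated in full; the proofs are below) =====
def Claim_equal_calcular_cadena_tragos : Prop := ∀ (nombre_victima : String) (mapa_jugadores : List (String × List (String × List String))) (visitados : Option (List String)), Dom_calcular_cadena_tragos nombre_victima mapa_jugadores visitados → Spec_calcular_cadena_tragos nombre_victima mapa_jugadores visitados (calcular_cadena_tragos nombre_victima mapa_jugadores visitados)

-- ===== LEMMAS AND PROOFS =====

-- definitional equations of the ports (the let-bindings zeta-reduce)
theorem calcAuxA_not_mem (f : Nat) (n : String) (mapa : List (String × List (String × List String))) (vis : PySem.Set String)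
    (hc : ¬ PySem.Set.contains vis n = true) :
    calcAuxA (f + 1) n mapa vis =
      (PySem.List.dedup (n :: (calcListA f (pvChildren mapa n) mapa (PySem.Set.add vis n)).1),
       (calcListA f (pvChildren mapa n) mapa (PySem.Set.add vis n)).2) := by
  rw [calcAuxA, if_neg hc]

theorem calcListA_cons (f : Nat) (m : String) (ms : List String) (mapa : List (String × List (String × List String))) (vis : PySem.Set String) :
    calcListA f (m :: ms) mapa vis =
      ((calcAuxA f m mapa vis).1 ++ (calcListA f ms mapa (calcAuxA f m mapa vis).2).1,
       (calcListA f ms mapa (calcAuxA f m mapa vis).2).2) := by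
  rw [calcListA]

theorem calcLoopB_not_mem (mapa : List (String × List (String × List String))) (actual : String) (rest : List String) (vis : PySem.Set String) (orden : List String)
    (hc : ¬ PySem.Set.contains vis actual = true) :
    calcLoopB mapa (actual :: rest) vis orden =
      calcLoopB mapa (pvChildren mapa actual ++ rest) (PySem.Set.add vis actual) (orden ++ [actual]) := by
  rw [calcLoopB, if_neg hc]

-- Invariant of A's recursion: the returned visited set is the old one with the
-- returned names appended; the returned names are distinct and were unvisited.
theorem pvInvListA_of_aux (fuel : Nat)
    (haux : ∀ n mapa vis, ∃ res, calcAuxA fuel n mapa vis = (res, vis ++ res) ∧ res.Nodup ∧ ∀ x ∈ res, x ∉ vis) :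
    ∀ (l : List String) mapa vis, ∃ res, calcListA fuel l mapa vis = (res, vis ++ res) ∧ res.Nodup ∧ ∀ x ∈ res, x ∉ vis := by
  intro l
  induction l with
  | nil =>
    intro mapa vis
    exact ⟨[], by simp [calcListA], List.nodup_nil, by simp⟩
  | cons m ms ih =>
    intro mapa vis
    obtain ⟨r1, h1, hn1, hd1⟩ := haux m mapa vis
    obtain ⟨r2, h2, hn2, hd2⟩ := ih mapa (vis ++ r1)
    refine ⟨r1 ++ r2, ?_, ?_, ?_⟩
    · simp [calcListA, h1, h2, List.append_assoc]
    · rw [List.nodup_append]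
      refine ⟨hn1, hn2, ?_⟩
      intro x hx1 y hy heq
      subst heq
      exact hd2 x hy (by simp [hx1])
    · intro x hx
      rcases List.mem_append.mp hx with hx | hx
      · exact hd1 x hx
      · exact fun hv => hd2 x hx (by simp [hv])

theorem pvInvA (fuel : Nat) :
    ∀ n mapa vis, ∃ res, calcAuxA fuel n mapa vis = (res, vis ++ res) ∧ res.Nodup ∧ ∀ x ∈ res, x ∉ vis := by
  induction fuel with
  | zero =>
    intro n mapa vis
    exact ⟨[], by simp [calcAuxA], List.nodup_nil, by simp⟩
  | succ f ih =>
    intro n mapa vis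
    by_cases hc : PySem.Set.contains vis n
    · refine ⟨[], ?_, List.nodup_nil, by simp⟩
      rw [calcAuxA, if_pos hc]
      simp
    · have hnv : n ∉ vis := fun hm => hc ((PySem.Set.contains_iff _ _).mpr hm)
      have hadd : PySem.Set.add vis n = vis ++ [n] := PySem.Set.add_of_not_mem hnv
      obtain ⟨r1, h1, hn1, hd1⟩ := pvInvListA_of_aux f ih (pvChildren mapa n) mapa (PySem.Set.add vis n)
      have hnr1 : n ∉ r1 := fun hm => hd1 n hm (by rw [hadd]; simp)
      have hnodup : (n :: r1).Nodup := List.nodup_cons.mpr ⟨hnr1, hn1⟩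
      have hded : PySem.List.dedup (n :: r1) = n :: r1 := by
        rw [PySem.List.dedup_eq_ofList]
        exact PySem.Set.ofList_eq_self_of_nodup _ hnodup
      refine ⟨n :: r1, ?_, hnodup, ?_⟩
      · rw [calcAuxA_not_mem f n mapa vis hc, h1, hded, hadd]
        simp
      · intro x hx
        rcases List.mem_cons.mp hx with hx | hx
        · exact hx ▸ hnv
        · exact fun hv => hd1 x hx (by rw [hadd]; simp [hv])

theorem pvUnvis_append_le (mapa : List (String × List (String × List String))) (vis e : List String) :
    pvUnvis mapa (vis ++ e) ≤ pvUnvis mapa vis := by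
  apply List.Sublist.length_le
  apply List.monotone_filter_right
  intro a ha
  rw [Bool.not_eq_true'] at ha ⊢
  rw [pvNotMemIff] at ha ⊢
  exact fun hm => ha (List.mem_append.mpr (Or.inl hm))

-- The bridge: running B's loop on a pending name (resp. list of names) equals running
-- A's recursion on it and appending its output, when the fuel exceeds the unvisited keys.
theorem pvBridge (fuel : Nat) :
    (∀ n mapa vis rest acc, pvUnvis mapa vis < fuel →
      calcLoopB mapa (n :: rest) vis acc =
        calcLoopB mapa rest (calcAuxA fuel n mapa vis).2 (acc ++ (calcAuxA fuel n mapa vis).1)) ∧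
    (∀ (l : List String) mapa vis rest acc, pvUnvis mapa vis < fuel →
      calcLoopB mapa (l ++ rest) vis acc =
        calcLoopB mapa rest (calcListA fuel l mapa vis).2 (acc ++ (calcListA fuel l mapa vis).1)) := by
  induction fuel with
  | zero => exact ⟨fun _ _ _ _ _ h => absurd h (by omega), fun _ _ _ _ _ h => absurd h (by omega)⟩
  | succ f ih =>
    have HA : ∀ n mapa vis rest acc, pvUnvis mapa vis < f + 1 →
        calcLoopB mapa (n :: rest) vis acc =
          calcLoopB mapa rest (calcAuxA (f + 1) n mapa vis).2 (acc ++ (calcAuxA (f + 1) n mapa vis).1) := by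
      intro n mapa vis rest acc hf
      by_cases hc : PySem.Set.contains vis n
      · rw [calcLoopB, if_pos hc, calcAuxA, if_pos hc]
        simp
      · have hnv : n ∉ vis := fun hm => hc ((PySem.Set.contains_iff _ _).mpr hm)
        obtain ⟨r1, h1, hn1, hd1⟩ :=
          pvInvListA_of_aux f (pvInvA f) (pvChildren mapa n) mapa (PySem.Set.add vis n)
        have hadd : PySem.Set.add vis n = vis ++ [n] := PySem.Set.add_of_not_mem hnv
        have hnr1 : n ∉ r1 := fun hm => hd1 n hm (by rw [hadd]; simp)
        have hded : PySem.Set.ofList (n :: r1) = n :: r1 :=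
          PySem.Set.ofList_eq_self_of_nodup _ (List.nodup_cons.mpr ⟨hnr1, hn1⟩)
        have hstep : calcLoopB mapa (n :: rest) vis acc =
            calcLoopB mapa (pvChildren mapa n ++ rest) (PySem.Set.add vis n) (acc ++ [n]) :=
          calcLoopB_not_mem mapa n rest vis acc hc
        have haux := calcAuxA_not_mem f n mapa vis hc
        by_cases hk : n ∈ mapa.map Prod.fst
        · have hlt : pvUnvis mapa (PySem.Set.add vis n) < f := by
            have := pvUnvis_lt mapa vis n hk hnv; omega
          rw [hstep, ih.2 (pvChildren mapa n) mapa (PySem.Set.add vis n) rest (acc ++ [n]) hlt,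
            haux, h1]
          simp [hded, List.append_assoc]
        · have hch : pvChildren mapa n = [] := pvChildren_of_not_key mapa n hk
          rw [hstep, hch, haux, hch]
          have hnil : calcListA f ([] : List String) mapa (PySem.Set.add vis n) =
              ([], PySem.Set.add vis n) := by rw [calcListA]
          rw [hnil]
          have hded1 : PySem.List.dedup [n] = [n] := by
            rw [PySem.List.dedup_eq_ofList]
            exact PySem.Set.ofList_eq_self_of_nodup _ (by simp)
          rw [List.nil_append]
          simp only [hded1]
    refine ⟨HA, ?_⟩
    intro l
    induction l with
    | nil =>
      intro mapa vis rest acc _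
      rw [calcListA]
      simp
    | cons m ms ihl =>
      intro mapa vis rest acc hf
      obtain ⟨r1, h1, _, _⟩ := pvInvA (f + 1) m mapa vis
      have hle : pvUnvis mapa (vis ++ r1) < f + 1 :=
        Nat.lt_of_le_of_lt (pvUnvis_append_le mapa vis r1) hf
      have hsplit := calcListA_cons (f + 1) m ms mapa vis
      calc calcLoopB mapa (m :: (ms ++ rest)) vis acc
          = calcLoopB mapa (ms ++ rest) (calcAuxA (f + 1) m mapa vis).2 (acc ++ (calcAuxA (f + 1) m mapa vis).1) :=
            HA m mapa vis (ms ++ rest) acc hf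
        _ = calcLoopB mapa rest (calcListA (f + 1) ms mapa (vis ++ r1)).2
              ((acc ++ r1) ++ (calcListA (f + 1) ms mapa (vis ++ r1)).1) := by
            rw [h1]
            exact ihl mapa (vis ++ r1) rest (acc ++ r1) hle
        _ = calcLoopB mapa rest (calcListA (f + 1) (m :: ms) mapa vis).2
              (acc ++ (calcListA (f + 1) (m :: ms) mapa vis).1) := by
            rw [hsplit, h1]
            simp [List.append_assoc]

theorem pvUnvis_le_len (mapa : List (String × List (String × List String))) (vis : PySem.Set String) :
    pvUnvis mapa vis ≤ mapa.length := by
  unfold pvUnvis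
  calc ((mapa.map Prod.fst).filter _).length ≤ (mapa.map Prod.fst).length :=
        List.length_filter_le _ _
    _ = mapa.length := List.length_map ..

-- ===== VERDICT (by name: the statement is the Claim_ definition above) =====
theorem calcular_cadena_tragos_spec : Claim_equal_calcular_cadena_tragos := by
  intro n mapa visOpt _
  unfold Spec_calcular_cadena_tragos calcular_cadena_tragos calcular_cadena_tragos_alt
  set vis := (match visOpt with
    | none => PySem.Set.empty
    | some l => PySem.Set.ofList l) with hvis
  have hf : pvUnvis mapa vis < mapa.length + 1 := Nat.lt_succ_of_le (pvUnvis_le_len mapa vis)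
  rw [(pvBridge (mapa.length + 1)).1 n mapa vis [] [] hf]
  rw [calcLoopB]
  simp
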